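-- pv_equiv track=rewrite | github.com/Christofosho/advent-of-code | 2023/py/code/8.py | part2
-- ===== SOURCE A (Python) =====
-- import math
--
-- class Node():
--   val = None
--   right = None
--   left = None
--
--   def __init__(self, val):
--     self.val = val
--
--   def __repr__(self):
--     return self.val
--
--   def addRight(self, right):
--     self.right = right
--
--   def addLeft(self, left):
--     self.left = left
--
-- def part2(L):
--   dirs = L[0]
--   steps = [step.split(" = ") for step in L[2:]]
--   steps = {
--     step[0]: (Node(step[0]), step[1].replace("(", "").replace(")", "").split(", "))
--     for step in steps
--   }
--
--   for step in steps.values():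
--     step[0].addRight(steps[step[1][1]][0])
--     step[0].addLeft(steps[step[1][0]][0])
--
--   for step in steps:
--     steps[step] = steps[step][0]
--
--   nodes = [step for step in steps.values() if step.val[2] == "A"]
--   i = 0
--
--   LCM = []
--   for node in nodes:
--     quant = 0
--     i = 0
--     while node.val[2] != "Z":
--       quant += 1
--       node = node.right if dirs[i] == "R" else node.left
--       i = 0 if i >= (len(dirs) - 1) else i + 1
--
--     LCM.append(quant)
--
--   return math.lcm(*LCM)
-- ===== SOURCE B (Python) =====
-- import math
--
-- def part2(L):
--     dirs = L[0]
--     graph = {}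
--     for line in L[2:]:
--         parts = line.split(" = ")
--         dests = parts[1].replace("(", "").replace(")", "").split(", ")
--         graph[parts[0]] = (dests[0], dests[1])
--
--     # Tabulate, for every node, ONE FULL PASS of the instruction string:
--     # where the node lands after len(dirs) steps, and the offset (0 = the node
--     # itself) of the first Z-node seen during that pass, if any.
--     table = {}
--     for name in graph:
--         cur, hit, t = name, None, 0
--         for d in dirs:
--             if hit is None and cur[2] == "Z":
--                 hit = t
--             cur = graph[cur][1] if d == "R" else graph[cur][0]
--             t += 1
--         table[name] = (cur, hit)
--
--     # Walk in pass-sized jumps through the table instead of single steps.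
--     def steps_to_z(cur):
--         passes = 0
--         while table[cur][1] is None:
--             cur = table[cur][0]
--             passes += 1
--         return passes * len(dirs) + table[cur][1]
--
--     return math.lcm(*(steps_to_z(name) for name in graph if name[2] == "A"))
-- ===== Notes on version B (the rewrite author's own statement) =====
-- stated objective: alternative
-- what changed: Instead of stepping one direction at a time per ghost, B precomputes a jump table over the whole instruction string once per node (landing node after a full pass plus the offset of the first Z inside the pass) and each ghost then advances in pass-sized jumps through the table; A builds a mutable Node object graph and single-steps it with an explicitly reset direction cursor.
import Mathlib
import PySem

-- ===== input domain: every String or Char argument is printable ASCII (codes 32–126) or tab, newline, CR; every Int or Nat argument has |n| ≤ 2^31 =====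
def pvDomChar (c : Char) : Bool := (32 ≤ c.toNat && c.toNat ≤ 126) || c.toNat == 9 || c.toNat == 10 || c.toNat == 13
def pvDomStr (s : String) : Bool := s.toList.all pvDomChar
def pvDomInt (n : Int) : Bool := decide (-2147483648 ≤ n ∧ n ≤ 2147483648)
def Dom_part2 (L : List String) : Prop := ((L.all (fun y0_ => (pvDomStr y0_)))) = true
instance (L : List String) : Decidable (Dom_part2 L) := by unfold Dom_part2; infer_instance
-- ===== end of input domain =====

-- B replaces A's per-step walk over a mutable Node-object graph by a precomputed jump table
-- (per node: landing node after one full pass of the directions + offset of the first Z in the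
-- pass) traversed in pass-sized jumps (objective: alternative algorithm, same exact results).

-- shared line-level parsing (both Pythons run the identical split/replace expressions):
-- step.split(" = ") -> key; step[1].replace("(","").replace(")","").split(", ") -> (left, right).
-- The .getD _ "" defaults are exact under Pre_ (Python raises IndexError on the excluded shapes).
def pvParse (line : String) : String × String × String :=
  (((PySem.Str.split? line " = ").getD []).getD 0 "",
   ((PySem.Str.split? (PySem.Str.replace (PySem.Str.replace (((PySem.Str.split? line " = ").getD []).getD 1 "") "(" "") ")" "") ", ").getD []).getD 0 "",
   ((PySem.Str.split? (PySem.Str.replace (PySem.Str.replace (((PySem.Str.split? line " = ").getD []).getD 1 "") "(" "") ")" "") ", ").getD []).getD 1 "")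

-- s[2]; exact wherever it is used, since Pre_ guarantees every key has length ≥ 3
def pvThird (s : String) : Char := s.toList.getD 2 ' '

-- ===== PORT A =====
-- A's Node objects are identified by their val (a node IS steps[val]); the pointer fields become
-- the pointed-to nodes' val strings, pointer dereference becomes a dict lookup of that val.
-- A's while loop, with A's explicit cursor i and its reset rule; fuel makes the loop total:
-- it exceeds the (#nodes * len(dirs)) state count, so it is never exhausted on inputs where the
-- Python loop terminates (Pre_ requires termination within that bound).
def pvWalkA (g : PySem.Dict String (String × String × String)) (cs : List Char) :
    Nat → String × String × String → Nat → Nat → Nat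
  | 0, _, _, quant => quant
  | fuel+1, node, i, quant =>
    if pvThird node.1 ≠ 'Z' then
      pvWalkA g cs fuel
        (if cs.getD i ' ' = 'R' then g.getD node.2.2 ("", "", "") else g.getD node.2.1 ("", "", ""))
        (if cs.length - 1 ≤ i then 0 else i + 1)
        (quant + 1)
    else quant

def part2 (L : List String) : Int :=
  let dirs := PySem.List.pyGetD L 0 ""       -- L[0]; Pre_: L ≠ []
  let cs := dirs.toList
  -- {step[0]: (Node(step[0]), pair) for step in …}: value = (Node.val, (left name, right name))
  let steps1 : PySem.Dict String (String × String × String) :=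
    (L.drop 2).foldl (fun d line => d.insert (pvParse line).1 ((pvParse line).1, (pvParse line).2))
      PySem.Dict.empty
  -- addRight/addLeft wiring + 'steps[step] = steps[step][0]': node = (val, left.val, right.val)
  let steps : PySem.Dict String (String × String × String) :=
    PySem.Dict.mk (steps1.items.map (fun p =>
      (p.1, (p.2.1, (steps1.getD p.2.2.1 ("", "", "")).1, (steps1.getD p.2.2.2 ("", "", "")).1))))
  let nodes := steps.values.filter (fun n => pvThird n.1 = 'A')
  let LCM := nodes.foldl
    (fun acc n => acc ++ [pvWalkA steps cs (L.length * cs.length + 1) n 0 0]) []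
  ((LCM.foldl Nat.lcm 1 : Nat) : Int)   -- math.lcm(*LCM); math.lcm() = 1

-- ===== PORT B =====
-- graph = {name: (left, right)} built by Source B's for-loop over L[2:]
def pvGraph (L : List String) : PySem.Dict String (String × String) :=
  (L.drop 2).foldl (fun d line => d.insert (pvParse line).1 (pvParse line).2) PySem.Dict.empty

-- Source B's inner for-loop body: state (cur, hit, t)
def pvPassStep (g : PySem.Dict String (String × String))
    (st : String × Option Nat × Nat) (d : Char) : String × Option Nat × Nat :=
  ((if d = 'R' then (g.getD st.1 ("", "")).2 else (g.getD st.1 ("", "")).1),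
   (if st.2.1 = none ∧ pvThird st.1 = 'Z' then some st.2.2 else st.2.1),
   st.2.2 + 1)

-- one full pass of the instruction string from a node: (landing node, first-Z offset if any)
def pvPass (g : PySem.Dict String (String × String)) (cs : List Char) (name : String) :
    String × Option Nat :=
  let r := cs.foldl (pvPassStep g) (name, none, 0)
  (r.1, r.2.1)

-- table = {name: (cur, hit) for name in graph}
def pvTable (g : PySem.Dict String (String × String)) (cs : List Char) :
    PySem.Dict String (String × Option Nat) :=
  g.keys.foldl (fun d name => d.insert name (pvPass g cs name)) PySem.Dict.empty

-- Source B's steps_to_z: jump pass by pass through the table; fuel (L.length+1 passes) exceeds the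
-- number of distinct pass-boundary nodes, so it is never exhausted on inputs satisfying Pre_
def pvJumpWalk (tbl : PySem.Dict String (String × Option Nat)) (cs : List Char) :
    Nat → String → Nat → Nat
  | 0, _, passes => passes * cs.length
  | fuel+1, cur, passes =>
    match (tbl.getD cur ("", none)).2 with
    | some t => passes * cs.length + t
    | none => pvJumpWalk tbl cs fuel (tbl.getD cur ("", none)).1 (passes + 1)

def part2_alt (L : List String) : Int :=
  let cs := (PySem.List.pyGetD L 0 "").toList
  let g := pvGraph L
  let tbl := pvTable g cs
  let lengths := (g.keys.filter (fun k => pvThird k = 'A')).map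
    (fun k => pvJumpWalk tbl cs (L.length + 1) k 0)
  ((lengths.foldl Nat.lcm 1 : Nat) : Int)

-- ===== PRECONDITION & SPEC =====
-- one ghost step of the walk, used only to state termination in Pre_
def pvStep (g : PySem.Dict String (String × String)) (cs : List Char) (st : String × Nat) :
    String × Nat :=
  ((if cs.getD st.2 ' ' = 'R' then (g.getD st.1 ("", "")).2 else (g.getD st.1 ("", "")).1),
   (st.2 + 1) % cs.length)

-- Pre_ admits exactly the inputs on which Python A returns: it excludes empty L (IndexError on
-- L[0]), lines of L[2:] without " = " or without ", " after paren removal (IndexError), keys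
-- shorter than 3 characters (IndexError on val[2]), left/right names that are not keys (KeyError
-- — A wires every node up front), and inputs whose while loop never terminates (empty dirs with a
-- start node, or an 'A'-key from which no 'Z'-key is reached within the #keys·len(dirs) state bound).
def Pre_part2 (L : List String) : Prop :=
  L ≠ [] ∧
  (∀ line ∈ L.drop 2,
      2 ≤ ((PySem.Str.split? line " = ").getD []).length ∧
      2 ≤ ((PySem.Str.split? (PySem.Str.replace (PySem.Str.replace (((PySem.Str.split? line " = ").getD []).getD 1 "") "(" "") ")" "") ", ").getD []).length) ∧
  (∀ k ∈ (pvGraph L).keys, 3 ≤ k.toList.length) ∧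
  (∀ p ∈ (pvGraph L).items, p.2.1 ∈ (pvGraph L).keys ∧ p.2.2 ∈ (pvGraph L).keys) ∧
  (∀ k ∈ (pvGraph L).keys, pvThird k = 'A' →
      (PySem.List.pyGetD L 0 "").toList ≠ [] ∧
      ∃ n ∈ List.range (L.length * (PySem.List.pyGetD L 0 "").toList.length + 1),
        pvThird ((pvStep (pvGraph L) (PySem.List.pyGetD L 0 "").toList)^[n] (k, 0)).1 = 'Z')

instance (L : List String) : Decidable (Pre_part2 L) := by unfold Pre_part2; infer_instance

def pvWitness_part2 : List String := ["LR", "", "AAA = (ZZZ, ZZZ)", "ZZZ = (ZZZ, ZZZ)"]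

def Spec_part2 (L : List String) (out : Int) : Prop := out = part2_alt L
instance (L : List String) (out : Int) : Decidable (Spec_part2 L out) := by unfold Spec_part2; infer_instance

-- ===== CLAIM (what is proved, stated in full; the proofs are below) =====
def Claim_equal_part2 : Prop := ∀ (L : List String), Dom_part2 L → Pre_part2 L → Spec_part2 L (part2 L)

-- ===== LEMMAS AND PROOFS =====

-- proof-side step walk keyed by node name; bridge between A's pointer walk and B's table walk
def pvWalkB (g : PySem.Dict String (String × String)) (cs : List Char) :
    Nat → String → Nat → Nat
  | 0, _, count => count
  | fuel+1, cur, count =>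
    if pvThird cur = 'Z' then count
    else pvWalkB g cs fuel
      (if cs.getD (count % cs.length) ' ' = 'R' then (g.getD cur ("", "")).2 else (g.getD cur ("", "")).1)
      (count + 1)

-- A's cursor update rule is the successor modulo len(dirs)
theorem pvMod_step (n s : Nat) (h : 0 < n) :
    (if n - 1 ≤ s % n then 0 else s % n + 1) = (s + 1) % n := by
  have hr : s % n < n := Nat.mod_lt _ h
  rw [← Nat.mod_add_mod]
  by_cases hc : n - 1 ≤ s % n
  · have he : s % n + 1 = n := by omega
    simp [he]
  · have he : (s % n + 1) % n = s % n + 1 := Nat.mod_eq_of_lt (by omega)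
    simp [hc, he]

-- the two parsing folds build dicts with pointwise-related items lists
theorem pv_items_rel (lines : List String) :
    ∀ (d1 : PySem.Dict String (String × String × String)) (d : PySem.Dict String (String × String)),
      d1.items = d.items.map (fun q => (q.1, (q.1, q.2))) →
      ((lines.foldl (fun d line => d.insert (pvParse line).1 ((pvParse line).1, (pvParse line).2)) d1).items
        = (lines.foldl (fun d line => d.insert (pvParse line).1 (pvParse line).2) d).items.map
            (fun q => (q.1, (q.1, q.2)))) := by
  induction lines with
  | nil => intro d1 d hrel; simpa using hrel
  | cons line rest ih =>
    intro d1 d hrel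
    simp only [List.foldl_cons]
    apply ih
    have hkeys : d1.keys = d.keys := by
      simp only [PySem.Dict.keys, hrel, List.map_map]
      rfl
    have hcont : d1.contains (pvParse line).1 = d.contains (pvParse line).1 := by
      rw [PySem.Dict.contains_eq_decide_mem_keys, PySem.Dict.contains_eq_decide_mem_keys, hkeys]
    by_cases hc : d.contains (pvParse line).1 = true
    · rw [PySem.Dict.items_insert_of_contains _ _ (by rw [hcont]; exact hc),
         PySem.Dict.items_insert_of_contains _ _ hc, hrel, List.map_map, List.map_map]
      apply List.map_congr_left
      intro q _
      by_cases hq : (q.1 == (pvParse line).1) = true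
      · simp [Function.comp, hq]
      · simp [Function.comp, hq]
    · rw [PySem.Dict.items_insert_of_not_contains _ _ (by rw [hcont]; simpa using hc),
         PySem.Dict.items_insert_of_not_contains _ _ (by simpa using hc), hrel, List.map_append]
      simp

-- lookup in a dict whose items were rebuilt by a key-preserving map of the items list
theorem pv_get?_mk_map {β : Type} (l : List (String × (String × String × String)))
    (f : String → String × String × String → β) (x : String) (v : String × String × String)
    (h : (PySem.Dict.mk l).get? x = some v) :
    (PySem.Dict.mk (l.map (fun p => (p.1, f p.1 p.2)))).get? x = some (f x v) := by
  induction l with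
  | nil => simp [PySem.Dict.get?] at h
  | cons p rest ih =>
    obtain ⟨k, w⟩ := p
    rw [PySem.Dict.get?_mk_cons] at h
    rw [List.map_cons, PySem.Dict.get?_mk_cons]
    by_cases hk : (k == x) = true
    · simp only [hk, if_pos, Option.some.injEq] at h ⊢
      obtain rfl := eq_of_beq hk
      rw [h]
    · simp only [hk] at h ⊢
      simpa using ih (by simpa using h)

-- the two walks stay synchronized: A's cursor i always equals the step count mod len(dirs)
theorem pvWalk_sync (g : PySem.Dict String (String × String))
    (g2 : PySem.Dict String (String × String × String)) (cs : List Char)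
    (hn : 0 < cs.length)
    (Hrel : ∀ x l r, g.get? x = some (l, r) → g2.getD x ("", "", "") = (x, l, r))
    (Hc : ∀ x l r, g.get? x = some (l, r) →
        (g.get? l).isSome = true ∧ (g.get? r).isSome = true) :
    ∀ fuel k s, (g.get? k).isSome = true →
      pvWalkA g2 cs fuel (g2.getD k ("", "", "")) (s % cs.length) s = pvWalkB g cs fuel k s := by
  intro fuel
  induction fuel with
  | zero => intro k s _; simp [pvWalkA, pvWalkB]
  | succ fuel ih =>
    intro k s hk
    obtain ⟨⟨l, r⟩, hget⟩ := Option.isSome_iff_exists.mp hk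
    rw [Hrel _ _ _ hget]
    simp only [pvWalkA, pvWalkB]
    have hgd : g.getD k ("", "") = (l, r) := PySem.Dict.getD_of_get?_eq_some _ _ hget
    obtain ⟨hl, hr⟩ := Hc _ _ _ hget
    have hmod := pvMod_step cs.length s hn
    by_cases hz : pvThird k = 'Z'
    · simp [hz]
    · simp only [hz, hgd, hmod, ne_eq, not_false_eq_true, if_true, if_false]
      split_ifs with hd
      · exact ih r (s + 1) hr
      · exact ih l (s + 1) hl

-- per-item equality of A's values-then-filter-then-walk list and B's keys-then-filter-then-walk list
theorem pv_lists (items : List (String × (String × String)))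
    (V : String × (String × String) → String × String × String)
    (wA : String × String × String → Nat) (wB : String → Nat)
    (hV : ∀ q ∈ items, (V q).1 = q.1)
    (hw : ∀ q ∈ items, pvThird q.1 = 'A' → wA (V q) = wB q.1) :
    ((items.map V).filter (fun n => pvThird n.1 = 'A')).map wA
      = ((items.map (fun x => x.1)).filter (fun k => pvThird k = 'A')).map wB := by
  induction items with
  | nil => rfl
  | cons p t ih =>
    have h1 : (V p).1 = p.1 := hV p List.mem_cons_self
    have hrec := ih (fun q hq => hV q (List.mem_cons_of_mem _ hq))
      (fun q hq => hw q (List.mem_cons_of_mem _ hq))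
    simp only [List.map_cons, List.filter_cons, h1]
    by_cases hA : pvThird p.1 = 'A'
    · simp [hA, hrec, hw p List.mem_cons_self hA]
    · simp [hA, hrec]

-- the cursor component of the iterated ghost step is the step count modulo len(dirs)
theorem pv_iter_snd (g : PySem.Dict String (String × String)) (cs : List Char)
    (k : String) :
    ∀ n, ((pvStep g cs)^[n] (k, 0)).2 = n % cs.length := by
  intro n
  induction n with
  | zero => simp
  | succ n ih =>
    rw [Function.iterate_succ_apply']
    show ((((pvStep g cs)^[n] (k, 0)).2 + 1) % cs.length) = (n + 1) % cs.length
    rw [ih, Nat.mod_add_mod]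

-- the trajectory stays inside the graph's key set
theorem pv_traj_mem (g : PySem.Dict String (String × String)) (cs : List Char)
    (Hk : ∀ x ∈ g.keys, ∃ l r, g.get? x = some (l, r) ∧ l ∈ g.keys ∧ r ∈ g.keys)
    (k : String) (hk : k ∈ g.keys) :
    ∀ n, ((pvStep g cs)^[n] (k, 0)).1 ∈ g.keys := by
  intro n
  induction n with
  | zero => simpa using hk
  | succ n ih =>
    rw [Function.iterate_succ_apply']
    obtain ⟨l, r, hget, hl, hr⟩ := Hk _ ih
    show (if cs.getD ((pvStep g cs)^[n] (k, 0)).2 ' ' = 'R'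
        then (g.getD ((pvStep g cs)^[n] (k, 0)).1 ("", "")).2
        else (g.getD ((pvStep g cs)^[n] (k, 0)).1 ("", "")).1) ∈ g.keys
    rw [PySem.Dict.getD_of_get?_eq_some _ _ hget]
    split_ifs
    · exact hr
    · exact hl

-- the step walk returns the least step count at which the trajectory hits a Z-node
theorem pvWalkB_least (g : PySem.Dict String (String × String)) (cs : List Char)
    (k : String) (N : Nat)
    (hZ : pvThird ((pvStep g cs)^[N] (k, 0)).1 = 'Z')
    (hmin : ∀ m < N, pvThird ((pvStep g cs)^[m] (k, 0)).1 ≠ 'Z') :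
    ∀ fuel n, n ≤ N → N ≤ n + fuel →
      pvWalkB g cs fuel ((pvStep g cs)^[n] (k, 0)).1 n = N := by
  intro fuel
  induction fuel with
  | zero => intro n h1 h2; simp only [pvWalkB]; omega
  | succ fuel ih =>
    intro n h1 h2
    simp only [pvWalkB]
    by_cases hz : pvThird ((pvStep g cs)^[n] (k, 0)).1 = 'Z'
    · rw [if_pos hz]
      by_contra hne
      exact hmin n (by omega) hz
    · rw [if_neg hz]
      have hnext : (if cs.getD (n % cs.length) ' ' = 'R'
          then (g.getD ((pvStep g cs)^[n] (k, 0)).1 ("", "")).2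
          else (g.getD ((pvStep g cs)^[n] (k, 0)).1 ("", "")).1)
          = ((pvStep g cs)^[n + 1] (k, 0)).1 := by
        rw [Function.iterate_succ_apply']
        show _ = (if cs.getD ((pvStep g cs)^[n] (k, 0)).2 ' ' = 'R'
          then (g.getD ((pvStep g cs)^[n] (k, 0)).1 ("", "")).2
          else (g.getD ((pvStep g cs)^[n] (k, 0)).1 ("", "")).1)
        rw [pv_iter_snd g cs k n]
      rw [hnext]
      have hnN : n ≠ N := by intro h; exact hz (h ▸ hZ)
      exact ih (n + 1) (by omega) (by omega)

-- first-match minimality of find? on a range'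
theorem pv_find?_range'_min (P : Nat → Bool) :
    ∀ (n a t : Nat), (List.range' a n).find? P = some t →
      ∀ m, a ≤ m → m < t → P m = false := by
  intro n
  induction n with
  | zero => intro a t h; simp at h
  | succ n ih =>
    intro a t h m h1 h2
    rw [List.range'_succ, List.find?_cons] at h
    by_cases hp : P a = true
    · simp only [hp] at h
      simp only [Option.some.injEq] at h
      omega
    · simp only [hp] at h
      by_cases hm : m = a
      · subst hm; simpa using hp
      · exact ih (a + 1) t h m (by omega) h2

-- one full pass of Source B's inner loop = len(dirs) ghost steps + first-Z offset within the pass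
theorem pvPass_fold (g : PySem.Dict String (String × String)) (cs : List Char)
    (k : String) :
    ∀ (l : List Char) (j : Nat), j + l.length = cs.length → l = cs.drop j →
      ∀ hit : Option Nat,
      l.foldl (pvPassStep g) (((pvStep g cs)^[j] (k, 0)).1, hit, j)
        = (((pvStep g cs)^[cs.length] (k, 0)).1,
           (match hit with
            | some t => some t
            | none => (List.range' j (cs.length - j)).find?
                (fun t => pvThird ((pvStep g cs)^[t] (k, 0)).1 == 'Z')),
           cs.length) := by
  intro l
  induction l with
  | nil =>
    intro j hlen hdrop hit
    have hj : j = cs.length := by simpa using hlen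
    subst hj
    cases hit <;> simp
  | cons c l' ih =>
    intro j hlen hdrop hit
    have hjlt : j < cs.length := by rw [List.length_cons] at hlen; omega
    have hcj : cs[j]? = some c := by
      have h0 : (cs.drop j)[0]? = cs[j + 0]? := List.getElem?_drop
      rw [← hdrop] at h0
      simpa using h0.symm
    have hgetD : cs.getD j ' ' = c := by
      simp [List.getD, hcj]
    have hdrop' : l' = cs.drop (j + 1) := by
      have h0 : (cs.drop j).drop 1 = cs.drop (j + 1) := by
        rw [List.drop_drop]
      rw [← hdrop] at h0
      simpa using h0
    have hstep : pvPassStep g (((pvStep g cs)^[j] (k, 0)).1, hit, j) c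
        = (((pvStep g cs)^[j + 1] (k, 0)).1,
           (if hit = none ∧ pvThird ((pvStep g cs)^[j] (k, 0)).1 = 'Z' then some j else hit),
           j + 1) := by
      simp only [pvPassStep]
      refine congrArg (fun x => (x, _, _)) ?_
      rw [Function.iterate_succ_apply']
      show _ = (if cs.getD ((pvStep g cs)^[j] (k, 0)).2 ' ' = 'R'
          then (g.getD ((pvStep g cs)^[j] (k, 0)).1 ("", "")).2
          else (g.getD ((pvStep g cs)^[j] (k, 0)).1 ("", "")).1)
      rw [pv_iter_snd g cs k j, Nat.mod_eq_of_lt hjlt, hgetD]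
    rw [List.foldl_cons, hstep,
      ih (j + 1) (by simp only [List.length_cons] at hlen; omega) hdrop' _]
    have hrange : List.range' j (cs.length - j)
        = j :: List.range' (j + 1) (cs.length - (j + 1)) := by
      have h1 : cs.length - j = (cs.length - (j + 1)) + 1 := by omega
      rw [h1, List.range'_succ]
    simp only [Prod.mk.injEq]
    refine ⟨trivial, ?_, trivial⟩
    cases hit with
    | some t => rfl
    | none =>
      simp only [true_and]
      rw [hrange, List.find?_cons]
      by_cases hz : pvThird ((pvStep g cs)^[j] (k, 0)).1 = 'Z'
      · simp [hz]
      · simp only [hz, if_false]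
        have : (pvThird ((pvStep g cs)^[j] (k, 0)).1 == 'Z') = false := by
          simpa using hz
        simp [this]

-- the table built by Source B's comprehension loop looks up to pvPass on every graph key
theorem pv_table_getD (g : PySem.Dict String (String × String)) (cs : List Char)
    (x : String) (hx : x ∈ g.keys) (hnd : g.keys.Nodup) :
    (pvTable g cs).getD x ("", none) = pvPass g cs x := by
  have hitems : (pvTable g cs).items = g.keys.map (fun k => (k, pvPass g cs k)) := by
    unfold pvTable
    rw [PySem.Dict.items_foldl_insert_fresh g.keys (fun a => a) (fun a => pvPass g cs a)
      PySem.Dict.empty (fun a _ => PySem.Dict.contains_empty a) (by simpa using hnd)]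
    simp [PySem.Dict.empty]
  have hmem : (x, pvPass g cs x) ∈ (pvTable g cs).items := by
    rw [hitems]; exact List.mem_map_of_mem hx
  have hndk : (pvTable g cs).keys.Nodup := by
    simp only [PySem.Dict.keys, hitems, List.map_map]
    simpa [Function.comp] using hnd
  exact PySem.Dict.getD_of_mem_items _ hmem hndk _

-- the jump walk through the table returns the same least-Z step count as the step walk
theorem pvJumpWalk_eq (g : PySem.Dict String (String × String)) (cs : List Char)
    (tbl : PySem.Dict String (String × Option Nat)) (hn : 0 < cs.length)
    (htbl : ∀ x ∈ g.keys, tbl.getD x ("", none) = pvPass g cs x)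
    (Hk : ∀ x ∈ g.keys, ∃ l r, g.get? x = some (l, r) ∧ l ∈ g.keys ∧ r ∈ g.keys)
    (k : String) (hk : k ∈ g.keys) (N : Nat)
    (hZ : pvThird ((pvStep g cs)^[N] (k, 0)).1 = 'Z')
    (hmin : ∀ m < N, pvThird ((pvStep g cs)^[m] (k, 0)).1 ≠ 'Z') :
    ∀ fuel passes, passes * cs.length ≤ N → N < (passes + fuel) * cs.length →
      pvJumpWalk tbl cs fuel (((pvStep g cs)^[passes * cs.length] (k, 0)).1) passes = N := by
  intro fuel
  induction fuel with
  | zero =>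
    intro passes h1 h2
    exfalso
    simp only [Nat.add_zero] at h2
    omega
  | succ fuel ih =>
    intro passes h1 h2
    have hcurmem : ((pvStep g cs)^[passes * cs.length] (k, 0)).1 ∈ g.keys :=
      pv_traj_mem g cs Hk k hk _
    set cur := ((pvStep g cs)^[passes * cs.length] (k, 0)).1 with hcur
    have hsnd0 : ((pvStep g cs)^[passes * cs.length] (k, 0)).2 = 0 := by
      rw [pv_iter_snd g cs k, Nat.mul_mod_left]
    have hshift : ∀ j, (pvStep g cs)^[j] (cur, 0) = (pvStep g cs)^[j + passes * cs.length] (k, 0) := by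
      intro j
      rw [Function.iterate_add_apply]
      have hpair : (pvStep g cs)^[passes * cs.length] (k, 0) = (cur, 0) :=
        Prod.ext_iff.mpr ⟨hcur.symm, hsnd0⟩
      congr 1
      exact hpair.symm
    have hpass : pvPass g cs cur
        = (((pvStep g cs)^[cs.length] (cur, 0)).1,
           (List.range' 0 (cs.length - 0)).find?
             (fun t => pvThird ((pvStep g cs)^[t] (cur, 0)).1 == 'Z')) := by
      show ((cs.foldl (pvPassStep g) (cur, none, 0)).1, (cs.foldl (pvPassStep g) (cur, none, 0)).2.1) = _
      rw [show ((cur, (none : Option Nat), 0) : String × Option Nat × Nat)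
            = (((pvStep g cs)^[0] (cur, 0)).1, (none : Option Nat), 0) from rfl,
          pvPass_fold g cs cur cs 0 (by simp) (by simp) none]
    have htc : tbl.getD cur ("", none)
        = (((pvStep g cs)^[cs.length] (cur, 0)).1,
           (List.range' 0 (cs.length - 0)).find?
             (fun t => pvThird ((pvStep g cs)^[t] (cur, 0)).1 == 'Z')) := by
      rw [htbl cur hcurmem, hpass]
    simp only [pvJumpWalk, htc]
    cases hfind : (List.range' 0 (cs.length - 0)).find?
        (fun t => pvThird ((pvStep g cs)^[t] (cur, 0)).1 == 'Z') with
    | some t =>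
      have htrange : t ∈ List.range' 0 (cs.length - 0) := List.mem_of_find?_eq_some hfind
      have htlt : t < cs.length := by
        have := List.mem_range'_1.mp htrange
        omega
      have hPt : pvThird ((pvStep g cs)^[t + passes * cs.length] (k, 0)).1 = 'Z' := by
        have hp := List.find?_some hfind
        rw [hshift] at hp
        simpa using hp
      have hle : N ≤ t + passes * cs.length := by
        by_contra hlt
        exact hmin _ (by omega) hPt
      have hge : ¬ N < t + passes * cs.length := by
        intro hlt
        have ht' : N - passes * cs.length < t := by omega
        have hP' := pv_find?_range'_min _ _ _ _ hfind (N - passes * cs.length) (by omega) ht'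
        rw [hshift] at hP'
        rw [show N - passes * cs.length + passes * cs.length = N by omega] at hP'
        simp [hZ] at hP'
      show passes * cs.length + t = N
      omega
    | none =>
      have hnone := List.find?_eq_none.mp hfind
      have hbig : (passes + 1) * cs.length ≤ N := by
        by_contra hlt
        have hsm : (passes + 1) * cs.length = passes * cs.length + cs.length := by ring
        have ht' : N - passes * cs.length < cs.length := by omega
        have hmem' : N - passes * cs.length ∈ List.range' 0 (cs.length - 0) := by
          rw [List.mem_range'_1]
          omega
        have := hnone _ hmem'
        rw [hshift, show N - passes * cs.length + passes * cs.length = N by omega] at this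
        simp [hZ] at this
      show pvJumpWalk tbl cs fuel ((pvStep g cs)^[cs.length] (cur, 0)).1 (passes + 1) = N
      have hend : (((pvStep g cs)^[cs.length] (cur, 0)).1)
          = ((pvStep g cs)^[(passes + 1) * cs.length] (k, 0)).1 := by
        rw [hshift, show cs.length + passes * cs.length = (passes + 1) * cs.length by ring]
      rw [hend]
      have h2' : N < (passes + 1 + fuel) * cs.length := by
        rw [show (passes + 1 + fuel) = passes + (fuel + 1) by omega]
        exact h2
      exact ih (passes + 1) hbig h2'

-- ===== VERDICT (by name: the statement is the Claim_ definition above) =====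
theorem part2_spec : Claim_equal_part2 := by
  intro L _ hpre
  obtain ⟨hL, hlines, hlen3, hclos, hterm⟩ := hpre
  unfold Spec_part2
  simp only [part2, part2_alt]
  set cs := (PySem.List.pyGetD L 0 "").toList with hcs
  set g : PySem.Dict String (String × String) := pvGraph L with hg
  set d1 : PySem.Dict String (String × String × String) :=
    (L.drop 2).foldl (fun d line => d.insert (pvParse line).1 ((pvParse line).1, (pvParse line).2))
      PySem.Dict.empty with hd1
  set g2 : PySem.Dict String (String × String × String) :=
    PySem.Dict.mk (d1.items.map (fun p =>
      (p.1, (p.2.1, (d1.getD p.2.2.1 ("", "", "")).1, (d1.getD p.2.2.2 ("", "", "")).1)))) with hg2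
  have hrel : d1.items = g.items.map (fun q => (q.1, (q.1, q.2))) := by
    rw [hd1, hg]
    unfold pvGraph
    exact pv_items_rel (L.drop 2) _ _ rfl
  have hnd1 : d1.keys.Nodup := by
    rw [hd1]
    exact PySem.Dict.nodup_keys_foldl_insert_key _ (fun line => (pvParse line).1)
      (fun _ line => ((pvParse line).1, (pvParse line).2)) _ PySem.Dict.nodup_keys_empty
  have fact1 : ∀ x v, g.get? x = some v → d1.get? x = some (x, v) := by
    intro x v h
    have hm : (x, (x, v)) ∈ d1.items := by
      rw [hrel]
      exact List.mem_map_of_mem (PySem.Dict.mem_items_of_get?_eq_some _ h)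
    exact (PySem.Dict.get?_eq_some_iff_mem_items _ _ _ hnd1).mpr hm
  have factK : ∀ x, x ∈ g.keys → (g.get? x).isSome = true := by
    intro x hx
    cases hq : g.get? x with
    | none => exact absurd ((PySem.Dict.get?_eq_none_iff_not_mem_keys _ _).mp hq) (not_not_intro hx)
    | some v => rfl
  have fact2 : ∀ x, x ∈ g.keys → (d1.getD x ("", "", "")).1 = x := by
    intro x hx
    obtain ⟨v, hv⟩ := Option.isSome_iff_exists.mp (factK x hx)
    rw [PySem.Dict.getD_of_get?_eq_some _ _ (fact1 x v hv)]
  have Hrel : ∀ x l r, g.get? x = some (l, r) → g2.getD x ("", "", "") = (x, l, r) := by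
    intro x l r h
    obtain ⟨hlk, hrk⟩ := hclos _ (PySem.Dict.mem_items_of_get?_eq_some _ h)
    have h2 := pv_get?_mk_map d1.items
      (fun _ v => (v.1, (d1.getD v.2.1 ("", "", "")).1, (d1.getD v.2.2 ("", "", "")).1))
      x (x, (l, r)) (fact1 x (l, r) h)
    have h3 : g2.get? x = some (x, (d1.getD l ("", "", "")).1, (d1.getD r ("", "", "")).1) := h2
    rw [PySem.Dict.getD_of_get?_eq_some _ _ h3, fact2 l hlk, fact2 r hrk]
  have Hc : ∀ x l r, g.get? x = some (l, r) →
      (g.get? l).isSome = true ∧ (g.get? r).isSome = true := by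
    intro x l r h
    obtain ⟨hlk, hrk⟩ := hclos _ (PySem.Dict.mem_items_of_get?_eq_some _ h)
    exact ⟨factK l hlk, factK r hrk⟩
  have hvals : g2.values = g.items.map (fun q =>
      (q.1, (d1.getD q.2.1 ("", "", "")).1, (d1.getD q.2.2 ("", "", "")).1)) := by
    have h0 : g2.items = d1.items.map (fun p =>
        (p.1, (p.2.1, (d1.getD p.2.2.1 ("", "", "")).1, (d1.getD p.2.2.2 ("", "", "")).1))) := by
      rw [hg2]
    simp only [PySem.Dict.values, h0, hrel, List.map_map]
    apply List.map_congr_left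
    intro q _
    rfl
  have hndg : g.keys.Nodup := by
    rw [hg]
    unfold pvGraph
    exact PySem.Dict.nodup_keys_foldl_insert_key _ (fun line => (pvParse line).1)
      (fun _ line => (pvParse line).2) _ PySem.Dict.nodup_keys_empty
  have Hk : ∀ x ∈ g.keys, ∃ l r, g.get? x = some (l, r) ∧ l ∈ g.keys ∧ r ∈ g.keys := by
    intro x hx
    obtain ⟨⟨l, r⟩, hv⟩ := Option.isSome_iff_exists.mp (factK x hx)
    obtain ⟨hl, hr⟩ := hclos _ (PySem.Dict.mem_items_of_get?_eq_some _ hv)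
    exact ⟨l, r, hv, hl, hr⟩
  have htbl : ∀ x ∈ g.keys, (pvTable g cs).getD x ("", none) = pvPass g cs x :=
    fun x hx => pv_table_getD g cs x hx hndg
  rw [PySem.List.foldl_append_singleton_eq_map, List.nil_append, hvals]
  simp only [PySem.Dict.keys]
  refine congrArg (fun l : List Nat => ((l.foldl Nat.lcm 1 : Nat) : Int)) ?_
  have hAB := pv_lists g.items
    (fun q => (q.1, (d1.getD q.2.1 ("", "", "")).1, (d1.getD q.2.2 ("", "", "")).1))
    (fun n => pvWalkA g2 cs (L.length * cs.length + 1) n 0 0)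
    (fun k => pvWalkB g cs (L.length * cs.length + 1) k 0)
    (fun q _ => rfl)
    (by
      rintro ⟨k0, l, r⟩ hq hA
      have hget : g.get? k0 = some (l, r) :=
        (PySem.Dict.get?_eq_some_iff_mem_items _ _ _ hndg).mpr hq
      obtain ⟨hlk, hrk⟩ := hclos _ hq
      have hk0 : k0 ∈ g.keys := by
        simp only [PySem.Dict.keys]
        exact List.mem_map_of_mem hq
      have hVq : ((k0, (d1.getD l ("", "", "")).1, (d1.getD r ("", "", "")).1) : String × String × String)
          = g2.getD k0 ("", "", "") := by
        rw [Hrel _ _ _ hget, fact2 l hlk, fact2 r hrk]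
      have hn : 0 < cs.length := List.length_pos_iff.mpr (hterm k0 hk0 hA).1
      show pvWalkA g2 cs (L.length * cs.length + 1) (k0, (d1.getD l ("", "", "")).1, (d1.getD r ("", "", "")).1) 0 0
          = pvWalkB g cs (L.length * cs.length + 1) k0 0
      rw [hVq]
      simpa using pvWalk_sync g g2 cs hn Hrel Hc (L.length * cs.length + 1) k0 0 (factK k0 hk0))
  rw [hAB]
  apply List.map_congr_left
  intro k hkf
  obtain ⟨hkmem', hkA'⟩ := List.mem_filter.mp hkf
  have hkmem : k ∈ g.keys := hkmem'
  have hA : pvThird k = 'A' := by simpa using hkA'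
  obtain ⟨hcsne, n0, hn0mem, hZ0⟩ := hterm k hkmem hA
  have hn : 0 < cs.length := List.length_pos_iff.mpr hcsne
  have hn0 : n0 ≤ L.length * cs.length := by
    have := List.mem_range.mp hn0mem
    omega
  have hex : ∃ n, pvThird ((pvStep g cs)^[n] (k, 0)).1 = 'Z' := ⟨n0, hZ0⟩
  have hZ : pvThird ((pvStep g cs)^[Nat.find hex] (k, 0)).1 = 'Z' := Nat.find_spec hex
  have hmin : ∀ m < Nat.find hex, pvThird ((pvStep g cs)^[m] (k, 0)).1 ≠ 'Z' :=
    fun m hm => Nat.find_min hex hm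
  have hNle : Nat.find hex ≤ L.length * cs.length :=
    le_trans (Nat.find_min' hex hZ0) hn0
  have h1 := pvWalkB_least g cs k (Nat.find hex) hZ hmin
    (L.length * cs.length + 1) 0 (Nat.zero_le _) (by omega)
  have h2 := pvJumpWalk_eq g cs (pvTable g cs) hn htbl Hk k hkmem (Nat.find hex) hZ hmin
    (L.length + 1) 0 (by simp)
    (by
      have hmul : (0 + (L.length + 1)) * cs.length = L.length * cs.length + cs.length := by ring
      omega)
  simp only [Function.iterate_zero, id] at h1 h2
  rw [show (0 * cs.length) = 0 by ring] at h2
  simp only [Function.iterate_zero, id] at h2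
  exact h1.trans h2.symm
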